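-- pv_equiv track=rewrite | github.com/alexsssaalexsubay-afk/nextapi | toolkit/batch_studio/utils.py | apply_continuity_inheritance
-- ===== SOURCE A (Python) =====
-- from typing import Any, Optional
--
-- CONTINUITY_FIELDS = ("character_ref", "outfit_ref", "scene_ref", "character_id", "outfit_id")
--
-- def apply_continuity_inheritance(rows: list[dict]) -> list[dict]:
--     """Within each continuity_group, fill empty ref fields from the first
--     (anchor) row of that group. Rows without a continuity_group are untouched.
--
--     Returns a new list of dicts.
--     """
--     by_group: dict[str, dict] = {}
--     out: list[dict] = []
--     for r in rows:
--         cg = _clean(r.get("continuity_group"))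
--         if not cg:
--             out.append(dict(r))
--             continue
--         if cg not in by_group:
--             by_group[cg] = r
--             out.append(dict(r))
--             continue
--         anchor = by_group[cg]
--         merged = dict(r)
--         for key in CONTINUITY_FIELDS:
--             if not _clean(merged.get(key)) and _clean(anchor.get(key)):
--                 merged[key] = anchor[key]
--         out.append(merged)
--     return out
--
-- def _clean(v: Optional[object]) -> str:
--     if v is None:
--         return ""
--     s = str(v).strip()
--     if s.lower() in {"nan", "none", "null"}:
--         return ""
--     return s
-- ===== SOURCE B (Python) =====
-- from typing import Optional
--
-- CONTINUITY_FIELDS = ("character_ref", "outfit_ref", "scene_ref", "character_id", "outfit_id")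
--
-- def _clean(v: Optional[object]) -> str:
--     if v is None:
--         return ""
--     s = str(v).strip()
--     if s.lower() in {"nan", "none", "null"}:
--         return ""
--     return s
--
-- def apply_continuity_inheritance(rows: list[dict]) -> list[dict]:
--     """Two-pass: first collect, per continuity_group, the anchor's clean
--     continuity fields once; then fill every grouped row from that list.
--
--     Returns a new list of dicts.
--     """
--     by_group: dict[str, list] = {}
--     for r in rows:
--         cg = _clean(r.get("continuity_group"))
--         if cg and cg not in by_group:
--             by_group[cg] = [(k, r[k]) for k in CONTINUITY_FIELDS if _clean(r.get(k))]
--     out: list[dict] = []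
--     for r in rows:
--         cg = _clean(r.get("continuity_group"))
--         if not cg:
--             out.append(dict(r))
--             continue
--         merged = dict(r)
--         for k, v in by_group[cg]:
--             if not _clean(merged.get(k)):
--                 merged[k] = v
--         out.append(merged)
--     return out
-- ===== Notes on version B (the rewrite author's own statement) =====
-- stated objective: alternative
-- what changed: Replaced A's single pass that stores whole anchor rows and re-cleans the anchor's fields for every later row of the group with two passes: pass 1 precomputes per group the anchor's clean continuity fields as a (key,value) list, pass 2 uniformly fills every grouped row (anchor included, a provable no-op) from that precomputed list.
import Mathlib
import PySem

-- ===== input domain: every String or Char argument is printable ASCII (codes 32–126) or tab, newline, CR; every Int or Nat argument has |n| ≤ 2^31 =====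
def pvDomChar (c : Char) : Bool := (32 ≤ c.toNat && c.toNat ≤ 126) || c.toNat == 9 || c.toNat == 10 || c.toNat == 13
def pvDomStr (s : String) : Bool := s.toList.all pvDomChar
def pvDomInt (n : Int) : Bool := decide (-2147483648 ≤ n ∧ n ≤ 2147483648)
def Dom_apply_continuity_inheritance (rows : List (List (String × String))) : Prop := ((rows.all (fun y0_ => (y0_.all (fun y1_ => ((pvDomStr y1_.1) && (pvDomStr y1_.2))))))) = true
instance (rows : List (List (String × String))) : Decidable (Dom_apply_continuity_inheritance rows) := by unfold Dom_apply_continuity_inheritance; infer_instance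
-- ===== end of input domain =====

-- B replaces A's single pass (that keeps whole anchor rows and re-cleans the anchor's fields for
-- every row) by two passes: pass 1 stores, per group, the anchor's clean continuity fields once as
-- a list of pairs; pass 2 fills every grouped row (the anchor included — a no-op) from that list.
-- Same return value; same cost class ("alternative", no speed claim).

-- ===== PORT A =====
def CONTINUITY_FIELDS : List String :=
  ["character_ref", "outfit_ref", "scene_ref", "character_id", "outfit_id"]

-- _clean(v): None → "", else strip, then "" if lowercased ∈ {nan, none, null} (values here are str)
def pvClean (v : Option String) : String :=
  match v with
  | none => ""
  | some s =>
    let t := PySem.Str.strip s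
    if PySem.Str.lower t ∈ ["nan", "none", "null"] then "" else t

-- r.get(k) on a row (a Python dict given as an association list)
def pvRowGet (r : List (String × String)) (k : String) : Option String :=
  (PySem.Dict.mk r).get? k

-- merged[key] = v on a row
def pvRowSet (r : List (String × String)) (k v : String) : List (String × String) :=
  ((PySem.Dict.mk r).insert k v).items

-- the inner 'for key in CONTINUITY_FIELDS' loop of A
def pvMergeA (anchor r : List (String × String)) : List (String × String) :=
  CONTINUITY_FIELDS.foldl
    (fun merged key =>
      if pvClean (pvRowGet merged key) = "" ∧ pvClean (pvRowGet anchor key) ≠ "" then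
        pvRowSet merged key ((pvRowGet anchor key).getD "")   -- anchor[key]; present: _clean(anchor.get(key)) ≠ ""
      else merged)
    r

-- one iteration of A's main loop (state = (by_group, out))
def pvStepA (st : PySem.Dict String (List (String × String)) × List (List (String × String)))
    (r : List (String × String)) :
    PySem.Dict String (List (String × String)) × List (List (String × String)) :=
  let cg := pvClean (pvRowGet r "continuity_group")
  if cg = "" then (st.1, st.2 ++ [r])
  else if st.1.contains cg = false then (st.1.insert cg r, st.2 ++ [r])
  else (st.1, st.2 ++ [pvMergeA (st.1.getD cg []) r])

def apply_continuity_inheritance (rows : List (List (String × String))) : List (List (String × String)) :=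
  (rows.foldl pvStepA (PySem.Dict.empty, [])).2

-- ===== PORT B =====
-- [(k, r[k]) for k in CONTINUITY_FIELDS if _clean(r.get(k))]
def pvFills (r : List (String × String)) : List (String × String) :=
  CONTINUITY_FIELDS.filterMap
    (fun k => if pvClean (pvRowGet r k) ≠ "" then some (k, (pvRowGet r k).getD "") else none)

-- pass 1: by_group[cg] = clean continuity fields of the group's first row
def pvByGroup (rows : List (List (String × String))) : PySem.Dict String (List (String × String)) :=
  rows.foldl
    (fun bg r =>
      let cg := pvClean (pvRowGet r "continuity_group")
      if cg ≠ "" ∧ bg.contains cg = false then bg.insert cg (pvFills r) else bg)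
    PySem.Dict.empty

-- the 'for k, v in by_group[cg]' fill loop of B
def pvFillFrom (fl r : List (String × String)) : List (String × String) :=
  fl.foldl
    (fun merged p => if pvClean (pvRowGet merged p.1) = "" then pvRowSet merged p.1 p.2 else merged)
    r

def apply_continuity_inheritance_alt (rows : List (List (String × String))) : List (List (String × String)) :=
  let by_group := pvByGroup rows
  rows.map
    (fun r =>
      let cg := pvClean (pvRowGet r "continuity_group")
      if cg = "" then r else pvFillFrom (by_group.getD cg []) r)

-- ===== PRECONDITION & SPEC =====
def Spec_apply_continuity_inheritance (rows : List (List (String × String))) (out : List (List (String × String))) : Prop := out = apply_continuity_inheritance_alt rows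
instance (rows : List (List (String × String))) (out : List (List (String × String))) : Decidable (Spec_apply_continuity_inheritance rows out) := by unfold Spec_apply_continuity_inheritance; infer_instance

-- ===== CLAIM (what is proved, stated in full; the proofs are below) =====
def Claim_equal_apply_continuity_inheritance : Prop := ∀ (rows : List (List (String × String))), Dom_apply_continuity_inheritance rows → Spec_apply_continuity_inheritance rows (apply_continuity_inheritance rows)

-- ===== LEMMAS AND PROOFS =====

-- the first row of the list whose clean continuity_group is c
def pvAnchor? (rows : List (List (String × String))) (c : String) : Option (List (String × String)) :=
  rows.find? (fun r => pvClean (pvRowGet r "continuity_group") == c)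

theorem pvByGroup_go_get (c : String) (hc : c ≠ "") :
    ∀ (rows : List (List (String × String))) (d : PySem.Dict String (List (String × String))),
      (rows.foldl
        (fun bg r =>
          let cg := pvClean (pvRowGet r "continuity_group")
          if cg ≠ "" ∧ bg.contains cg = false then bg.insert cg (pvFills r) else bg) d).get? c
      = (d.get? c).or ((pvAnchor? rows c).map pvFills) := by
  intro rows
  induction rows with
  | nil => intro d; simp [pvAnchor?]
  | cons r rs ih =>
    intro d
    simp only [List.foldl_cons, ih]
    by_cases hcg : pvClean (pvRowGet r "continuity_group") = ""
    · simp [pvAnchor?, hcg, hc, Ne.symm hc]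
    · by_cases hct : d.contains (pvClean (pvRowGet r "continuity_group")) = false
      · simp only [hcg, hct, ne_eq, not_false_iff, and_self, if_true]
        by_cases hec : c = pvClean (pvRowGet r "continuity_group")
        · have hdn : d.get? c = none := by
            rw [hec]
            cases hg : d.get? (pvClean (pvRowGet r "continuity_group")) with
            | none => rfl
            | some v => rw [PySem.Dict.contains_eq_isSome_get?, hg] at hct; simp at hct
          simp only [PySem.Dict.get?_insert, if_pos hec, pvAnchor?, List.find?_cons]
          rw [← hec, hdn]
          have : (pvClean (pvRowGet r "continuity_group") == c) = true := by simp [hec]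
          simp [this]
        · simp [PySem.Dict.get?_insert, hec, pvAnchor?, List.find?_cons, Ne.symm hec]
      · simp only [hct, and_false, if_false]
        by_cases hec : c = pvClean (pvRowGet r "continuity_group")
        · obtain ⟨v, hv⟩ : ∃ v, d.get? c = some v := by
            rw [hec]
            rw [PySem.Dict.contains_eq_isSome_get?] at hct
            cases hg : d.get? (pvClean (pvRowGet r "continuity_group")) with
            | none => rw [hg] at hct; simp at hct
            | some v => exact ⟨v, rfl⟩
          simp [hv]
        · simp [pvAnchor?, List.find?_cons, Ne.symm hec]

theorem pvByGroup_get (rows : List (List (String × String))) (c : String) (hc : c ≠ "") :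
    (pvByGroup rows).get? c = (pvAnchor? rows c).map pvFills := by
  unfold pvByGroup
  rw [pvByGroup_go_get c hc rows PySem.Dict.empty]
  simp

-- key lemma 1: merging from a raw anchor row is merging from its precomputed clean-field list
theorem pvMerge_eq_fill (a : List (String × String)) :
    ∀ (ks : List String) (m : List (String × String)),
      ks.foldl
        (fun merged key =>
          if pvClean (pvRowGet merged key) = "" ∧ pvClean (pvRowGet a key) ≠ "" then
            pvRowSet merged key ((pvRowGet a key).getD "")
          else merged) m
      = (ks.filterMap
          (fun k => if pvClean (pvRowGet a k) ≠ "" then some (k, (pvRowGet a k).getD "") else none)).foldl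
          (fun merged p => if pvClean (pvRowGet merged p.1) = "" then pvRowSet merged p.1 p.2 else merged) m := by
  intro ks
  induction ks with
  | nil => intro m; rfl
  | cons k ks ih =>
    intro m
    by_cases ha : pvClean (pvRowGet a k) = ""
    · simp [ha, List.filterMap_cons, ih]
    · simp [ha, List.filterMap_cons, ih]

theorem pvMergeA_eq (a r : List (String × String)) : pvMergeA a r = pvFillFrom (pvFills a) r := by
  unfold pvMergeA pvFillFrom pvFills
  exact pvMerge_eq_fill a CONTINUITY_FIELDS r

-- key lemma 2: filling a row from its own clean fields changes nothing
theorem pvFillFrom_noop :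
    ∀ (fl m : List (String × String)), (∀ p ∈ fl, pvClean (pvRowGet m p.1) ≠ "") →
      pvFillFrom fl m = m := by
  intro fl
  induction fl with
  | nil => intro m _; rfl
  | cons p ps ih =>
    intro m h
    have hp := h p (List.mem_cons_self ..)
    unfold pvFillFrom
    simp only [List.foldl_cons, hp, if_neg hp]
    exact ih m (fun q hq => h q (List.mem_cons_of_mem _ hq))

theorem pvFillFrom_fills_self (r : List (String × String)) : pvFillFrom (pvFills r) r = r := by
  apply pvFillFrom_noop
  intro p hp
  unfold pvFills at hp
  rw [List.mem_filterMap] at hp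
  obtain ⟨k, _, hk⟩ := hp
  by_cases hc : pvClean (pvRowGet r k) = ""
  · simp [hc] at hk
  · rw [if_pos hc] at hk
    obtain rfl := Option.some.inj hk
    simpa using hc

-- the per-row function of B's second pass
def pvStepB (bg : PySem.Dict String (List (String × String))) (r : List (String × String)) :
    List (String × String) :=
  if pvClean (pvRowGet r "continuity_group") = "" then r else pvFillFrom (bg.getD (pvClean (pvRowGet r "continuity_group")) []) r

-- main loop invariant: A's partial anchor dict agrees with the global first-anchor function
theorem pvMainA (rows : List (List (String × String))) :
    ∀ (rest : List (List (String × String)))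
      (d : PySem.Dict String (List (String × String))) (out : List (List (String × String))),
      (∀ c, c ≠ "" → pvAnchor? rows c = (d.get? c).or (pvAnchor? rest c)) →
      (rest.foldl pvStepA (d, out)).2 = out ++ rest.map (pvStepB (pvByGroup rows)) := by
  intro rest
  induction rest with
  | nil => intro d out _; simp
  | cons r rs ih =>
    intro d out hinv
    rw [List.foldl_cons, List.map_cons]
    by_cases hcg : pvClean (pvRowGet r "continuity_group") = ""
    · have hA : pvStepA (d, out) r = (d, out ++ [r]) := by simp [pvStepA, hcg]
      rw [hA, ih d (out ++ [r]) ?_, pvStepB, if_pos hcg, List.append_assoc]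
      · rfl
      · intro c hc
        rw [hinv c hc, pvAnchor?, List.find?_cons]
        have : (pvClean (pvRowGet r "continuity_group") == c) = false := by
          rw [hcg]; exact beq_false_of_ne (Ne.symm hc)
        rw [this, pvAnchor?]
    · have hanch : pvAnchor? rows (pvClean (pvRowGet r "continuity_group"))
          = (d.get? (pvClean (pvRowGet r "continuity_group"))).or (some r) := by
        rw [hinv _ hcg, pvAnchor?, List.find?_cons]
        simp
      by_cases hct : d.contains (pvClean (pvRowGet r "continuity_group")) = false
      · have hdn : d.get? (pvClean (pvRowGet r "continuity_group")) = none := by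
          rw [PySem.Dict.contains_eq_isSome_get?] at hct
          cases hg : d.get? (pvClean (pvRowGet r "continuity_group")) with
          | none => rfl
          | some v => rw [hg] at hct; simp at hct
        have hA : pvStepA (d, out) r
            = (d.insert (pvClean (pvRowGet r "continuity_group")) r, out ++ [r]) := by
          simp [pvStepA, hcg, hct]
        rw [hA, ih _ (out ++ [r]) ?_]
        · have hstep : pvStepB (pvByGroup rows) r = r := by
            rw [pvStepB, if_neg hcg,
              PySem.Dict.getD_eq_get?_getD, pvByGroup_get rows _ hcg, hanch, hdn]
            simp [pvFillFrom_fills_self]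
          rw [hstep, List.append_assoc]; rfl
        · intro c hc
          by_cases hec : c = pvClean (pvRowGet r "continuity_group")
          · rw [hec, hanch, hdn, PySem.Dict.get?_insert, if_pos rfl]
            simp
          · rw [hinv c hc, PySem.Dict.get?_insert, if_neg hec, pvAnchor?, List.find?_cons]
            have : (pvClean (pvRowGet r "continuity_group") == c) = false := by
              simp; exact fun h => hec h.symm
            rw [this, pvAnchor?]
      · obtain ⟨a, ha⟩ : ∃ a, d.get? (pvClean (pvRowGet r "continuity_group")) = some a := by
          rw [PySem.Dict.contains_eq_isSome_get?] at hct
          cases hg : d.get? (pvClean (pvRowGet r "continuity_group")) with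
          | none => rw [hg] at hct; simp at hct
          | some v => exact ⟨v, rfl⟩
        have hA : pvStepA (d, out) r
            = (d, out ++ [pvMergeA (d.getD (pvClean (pvRowGet r "continuity_group")) []) r]) := by
          simp [pvStepA, hcg, hct]
        rw [hA, ih d _ ?_]
        · have hstep : pvStepB (pvByGroup rows) r
              = pvMergeA (d.getD (pvClean (pvRowGet r "continuity_group")) []) r := by
            rw [pvStepB, if_neg hcg,
              PySem.Dict.getD_eq_get?_getD, pvByGroup_get rows _ hcg, hanch, ha]
            simp only [Option.or_some, Option.map_some, Option.getD_some]
            rw [PySem.Dict.getD_eq_get?_getD, ha, Option.getD_some, pvMergeA_eq]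
          rw [hstep, List.append_assoc]; rfl
        · intro c hc
          by_cases hec : c = pvClean (pvRowGet r "continuity_group")
          · rw [hec, hanch, ha]
            simp
          · rw [hinv c hc, pvAnchor?, List.find?_cons]
            have : (pvClean (pvRowGet r "continuity_group") == c) = false := by
              simp; exact fun h => hec h.symm
            rw [this, pvAnchor?]

-- ===== VERDICT (by name: the statement is the Claim_ definition above) =====
theorem apply_continuity_inheritance_spec : Claim_equal_apply_continuity_inheritance := by
  intro rows _
  show apply_continuity_inheritance rows = apply_continuity_inheritance_alt rows
  unfold apply_continuity_inheritance apply_continuity_inheritance_alt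
  rw [pvMainA rows rows PySem.Dict.empty [] (by intro c _; simp)]
  rfl
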